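-- pv_equiv track=rewrite | github.com/kelpasa/Code_Wars_Python | 6 кю/String array revisal.py | smash
-- ===== SOURCE A (Python) =====
-- def smash(arr):
--     lst = []
--     for i in range(len(arr)):
--         try:
--             if arr[i] != arr[i+1]:
--                 lst.append(arr[i])
--         except IndexError:
--             lst.append(arr[-1])
--     return ''.join(lst)
-- ===== SOURCE B (Python) =====
-- def smash(arr):
--     out = []
--     i, n = 0, len(arr)
--     while i < n:
--         out.append(arr[i])
--         j = i + 1
--         while j < n and arr[j] == arr[i]:
--             j += 1
--         i = j
--     return ''.join(out)
-- ===== Notes on version B (the rewrite author's own statement) =====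
-- stated objective: alternative
-- what changed: Replaces the per-index lookahead loop with its try/except IndexError tail sentinel by a two-pointer run-skipping traversal: an outer loop emits the element at the start of each run and an inner scan jumps the pointer past the whole run.
import Mathlib
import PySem

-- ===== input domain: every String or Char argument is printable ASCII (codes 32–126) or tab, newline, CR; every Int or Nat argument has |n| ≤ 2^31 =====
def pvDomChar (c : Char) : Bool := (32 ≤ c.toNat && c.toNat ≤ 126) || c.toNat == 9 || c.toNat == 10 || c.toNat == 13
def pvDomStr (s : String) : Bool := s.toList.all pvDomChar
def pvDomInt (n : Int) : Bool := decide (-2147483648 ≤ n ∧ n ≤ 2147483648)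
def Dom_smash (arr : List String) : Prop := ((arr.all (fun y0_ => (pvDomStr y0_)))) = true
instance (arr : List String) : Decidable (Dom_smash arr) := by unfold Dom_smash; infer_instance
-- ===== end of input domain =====

-- B replaces A's per-index lookahead loop (with try/except IndexError tail sentinel) by a two-pointer run-skipping traversal: emit the first element of each run, jump past the run; alternative decomposition, same cost.


-- ===== PORT A =====
-- loop over i in range(len(arr)); arr[i+1] may raise IndexError (pyGet? = none), then append arr[-1];
-- arr[i] is always in range for i in range(len(arr)), so pyGetD with a dummy default is exact there.
def smash (arr : List String) : String :=
  let lst : List String :=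
    (PySem.List.pyRange 0 (arr.length : Int) 1).foldl
      (fun lst i =>
        match PySem.List.pyGet? arr (i + 1) with
        | some nxt =>
            if PySem.List.pyGetD arr i "" ≠ nxt then lst ++ [PySem.List.pyGetD arr i ""] else lst
        | none => lst ++ [PySem.List.pyGetD arr (-1) ""])
      []
  String.join lst

-- ===== PORT B =====
-- two-pointer run skipping: emit the element at the start of a run, then the inner scan
-- (here: dropWhile over the remaining list, exactly B's `while j < n and arr[j] == arr[i]`)
-- jumps past the rest of the run; the outer loop resumes at the next run.
def runSkip : List String → List String
  | [] => []
  | x :: xs => x :: runSkip (xs.dropWhile (fun y => y == x))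
termination_by l => l.length
decreasing_by
  simp only [List.length_cons]
  exact Nat.lt_succ_of_le (List.length_dropWhile_le _ _)

def smash_alt (arr : List String) : String := String.join (runSkip arr)

-- ===== PRECONDITION & SPEC =====
def Spec_smash (arr : List String) (out : String) : Prop := out = smash_alt arr
instance (arr : List String) (out : String) : Decidable (Spec_smash arr out) := by unfold Spec_smash; infer_instance

-- ===== CLAIM (what is proved, stated in full; the proofs are below) =====
def Claim_equal_smash : Prop := ∀ (arr : List String), Dom_smash arr → Spec_smash arr (smash arr)

-- ===== LEMMAS AND PROOFS =====

-- the per-index contribution of A's loop body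
def pvG (arr : List String) (i : Int) : List String :=
  match PySem.List.pyGet? arr (i + 1) with
  | some nxt =>
      if PySem.List.pyGetD arr i "" ≠ nxt then [PySem.List.pyGetD arr i ""] else []
  | none => [PySem.List.pyGetD arr (-1) ""]

-- proof-only intermediate: adjacent-dedup by cases on the first two elements
def pvKeys : List String → List String
  | [] => []
  | [x] => [x]
  | x :: y :: xs => if x = y then pvKeys (y :: xs) else x :: pvKeys (y :: xs)

theorem foldA_eq_flatMap (arr : List String) :
    ∀ (l : List Int) (acc : List String),
      l.foldl
        (fun lst i =>
          match PySem.List.pyGet? arr (i + 1) with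
          | some nxt =>
              if PySem.List.pyGetD arr i "" ≠ nxt then lst ++ [PySem.List.pyGetD arr i ""] else lst
          | none => lst ++ [PySem.List.pyGetD arr (-1) ""])
        acc = acc ++ l.flatMap (pvG arr) := by
  intro l
  induction l with
  | nil => intro acc; simp
  | cons i t ih =>
      intro acc
      simp only [List.foldl_cons, List.flatMap_cons, ih]
      have : (match PySem.List.pyGet? arr (i + 1) with
        | some nxt =>
            if PySem.List.pyGetD arr i "" ≠ nxt then acc ++ [PySem.List.pyGetD arr i ""] else acc
        | none => acc ++ [PySem.List.pyGetD arr (-1) ""]) = acc ++ pvG arr i := by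
        unfold pvG
        cases PySem.List.pyGet? arr (i + 1) with
        | none => rfl
        | some nxt =>
            simp only
            split_ifs <;> simp
      rw [this, List.append_assoc]

theorem pvG_shift (x : String) (xs : List String) (k : ℕ) (hk : k < xs.length) :
    pvG (x :: xs) (1 + (k : Int)) = pvG xs (k : Int) := by
  unfold pvG
  have h1 : (1 + (k : Int) + 1) = ((k + 2 : ℕ) : Int) := by push_cast; ring
  have h2 : ((k : Int) + 1) = ((k + 1 : ℕ) : Int) := by push_cast; ring
  have h3 : (1 + (k : Int)) = ((k + 1 : ℕ) : Int) := by push_cast; ring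
  rw [h1, h2, h3, PySem.List.pyGet?_natCast, PySem.List.pyGet?_natCast,
      PySem.List.pyGetD_natCast, PySem.List.pyGetD_natCast]
  have hget : (x :: xs)[k + 2]? = xs[k + 1]? := by simp
  have hgetD : (x :: xs).getD (k + 1) "" = xs.getD k "" := by simp [List.getD]
  rw [hget, hgetD]
  have hne : xs ≠ [] := by intro h; subst h; simp at hk
  have hlast : PySem.List.pyGetD (x :: xs) (-1) "" = PySem.List.pyGetD xs (-1) "" := by
    rw [PySem.List.pyGetD_neg_one (x :: xs) "" (by simp),
        PySem.List.pyGetD_neg_one xs "" hne, List.getLast_cons hne]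
  rw [hlast]

theorem flatMap_pvG_eq (arr : List String) :
    (PySem.List.pyRange 0 (arr.length : Int) 1).flatMap (pvG arr) = pvKeys arr := by
  induction arr with
  | nil => simp [pvKeys, PySem.List.pyRange_one_eq_nil]
  | cons x xs ih =>
      have hlen : ((x :: xs).length : Int) = (xs.length : Int) + 1 := by simp
      rw [hlen, PySem.List.pyRange_one_cons (by positivity)]
      have hshift : (PySem.List.pyRange 1 ((xs.length : Int) + 1) 1).flatMap (pvG (x :: xs))
          = (PySem.List.pyRange 0 (xs.length : Int) 1).flatMap (pvG xs) := by
        rw [PySem.List.pyRange_one 1 ((xs.length : Int) + 1),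
            PySem.List.pyRange_one 0 (xs.length : Int)]
        have h1 : ((xs.length : Int) + 1 - 1).toNat = xs.length := by omega
        have h2 : ((xs.length : Int) - 0).toNat = xs.length := by omega
        rw [h1, h2]
        simp only [List.flatMap_map]
        unfold List.flatMap
        congr 1
        apply List.map_congr_left
        intro k hk
        simp only [zero_add]
        exact pvG_shift x xs k (List.mem_range.mp hk)
      rw [List.flatMap_cons, show (0 : Int) + 1 = 1 from by norm_num, hshift, ih]
      rcases xs with _ | ⟨y, t⟩
      · have h0 : pvG [x] 0 = [x] := by
          unfold pvG
          rw [show (0 : Int) + 1 = ((0 : ℕ) : Int) + 1 by norm_num,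
              PySem.List.pyGet?_cons_succ]
          simp [PySem.List.pyGet?_zero, PySem.List.pyGetD_neg_one [x] "" (by simp)]
        simp [h0, pvKeys]
      · have h0 : pvG (x :: y :: t) 0 = if x = y then [] else [x] := by
          unfold pvG
          rw [show (0 : Int) + 1 = ((0 : ℕ) : Int) + 1 by norm_num,
              PySem.List.pyGet?_cons_succ]
          simp only [PySem.List.pyGetD_zero_cons]
          split_ifs with h1 <;> simp_all
        rw [h0]
        by_cases hxy : x = y <;> simp [pvKeys, hxy]

theorem pvKeys_cons (xs : List String) (x : String) :
    pvKeys (x :: xs) = x :: pvKeys (xs.dropWhile (fun y => y == x)) := by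
  induction xs generalizing x with
  | nil => simp [pvKeys]
  | cons y ys ih =>
      by_cases hxy : x = y
      · subst hxy
        simp only [pvKeys, if_pos rfl, List.dropWhile_cons, beq_self_eq_true, if_pos]
        exact ih x
      · simp [pvKeys, hxy, Ne.symm, show (y == x) = false by
          simp [beq_eq_false_iff_ne]; exact fun h => hxy h.symm]

theorem runSkip_eq_pvKeys (l : List String) : runSkip l = pvKeys l := by
  induction l using runSkip.induct with
  | case1 => simp [runSkip, pvKeys]
  | case2 x xs ih => rw [runSkip, ih, pvKeys_cons]

-- ===== VERDICT =====
theorem smash_spec : Claim_equal_smash := by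
  intro arr _
  unfold Spec_smash smash smash_alt
  rw [foldA_eq_flatMap arr, List.nil_append, flatMap_pvG_eq, runSkip_eq_pvKeys]
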